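-- pv_equiv track=rewrite | github.com/datatrader-space/follow4follow-central | sessionbot/handlers/scrapetask.py | handle_scrapetask_form_from_frontend
-- ===== SOURCE A (Python) =====
-- def handle_scrapetask_form_from_frontend(task):
--     inputs=[]
--     _={'service':'instagram','name':task.get('name'),'max_threads':task.get('max_threads'),'max_requests_per_day':task.get('max_requests_per_day')}
--
--     scrape_value = task.get('scrape_value')
--     if task['scrape_type']=='by_location':
--         for value in scrape_value.split(','):
--             inputs.append('location_posts__'+str(value))
--     if task['scrape_type']=='by_username':
--         for value in scrape_value.split(','):
--             inputs.append('user_followers__'+value)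
--
--     if task['scrape_type']=='by_hashtag':
--         for value in scrape_value.split(','):
--             inputs.append('hashtag__'+value)
--     if task['scrape_type']=='by_keyword':
--         for value in scrape_value.split(','):
--             inputs.append('keyword__'+value)
--     _.update({'input':','.join(inputs)
--                 })
--     return _
-- ===== SOURCE B (Python) =====
-- PREFIXES = {
--     'by_location': 'location_posts__',
--     'by_username': 'user_followers__',
--     'by_hashtag': 'hashtag__',
--     'by_keyword': 'keyword__',
-- }
--
-- def handle_scrapetask_form_from_frontend(task):
--     # Instead of splitting into a list, prefixing each item and re-joining,
--     # rewrite the comma-separated string in place: every ',' becomes ',' + prefix,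
--     # and one prefix goes in front.  ','.join(p+v for v in s.split(',')) == p + s.replace(',', ','+p).
--     prefix = PREFIXES.get(task['scrape_type'])
--     if prefix is None:
--         joined = ''
--     else:
--         joined = prefix + task.get('scrape_value').replace(',', ',' + prefix)
--     return {'service': 'instagram',
--             'name': task.get('name'),
--             'max_threads': task.get('max_threads'),
--             'max_requests_per_day': task.get('max_requests_per_day'),
--             'input': joined}
-- ===== Notes on version B (the rewrite author's own statement) =====
-- stated objective: alternative
-- what changed: Instead of splitting scrape_value into a list, appending a prefixed copy of each piece and re-joining, B looks the prefix up in a table and produces the joined string directly by one string rewrite: prefix + scrape_value.replace(',', ','+prefix) — no list is ever built.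
import Mathlib
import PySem

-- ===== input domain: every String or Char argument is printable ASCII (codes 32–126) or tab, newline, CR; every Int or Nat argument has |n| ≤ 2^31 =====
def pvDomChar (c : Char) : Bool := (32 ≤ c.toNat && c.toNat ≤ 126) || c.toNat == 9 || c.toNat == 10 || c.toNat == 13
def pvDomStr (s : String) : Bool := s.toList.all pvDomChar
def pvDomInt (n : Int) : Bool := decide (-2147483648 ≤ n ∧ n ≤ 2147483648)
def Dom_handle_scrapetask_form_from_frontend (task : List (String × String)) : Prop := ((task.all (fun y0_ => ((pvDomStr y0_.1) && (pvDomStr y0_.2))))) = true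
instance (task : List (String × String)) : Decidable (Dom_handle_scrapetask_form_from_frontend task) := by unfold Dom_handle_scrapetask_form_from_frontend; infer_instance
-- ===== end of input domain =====

-- B replaces A's split-into-list / prefix-each-item / re-join pipeline by a prefix-table lookup
-- plus one in-place string rewrite (every ',' -> ','+prefix, one prefix in front); objective: simpler.

-- task.get(k): first match in the association list (Python dict convention of this file)
def pvTaskGet (task : List (String × String)) (k : String) : Option String :=
  (task.find? (fun p => p.1 == k)).map (·.2)

-- ===== PORT A =====
def handle_scrapetask_form_from_frontend (task : List (String × String)) : List (String × Option String) :=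
  let scrape_value := pvTaskGet task "scrape_value"
  -- task['scrape_type']: KeyError when absent (excluded by Pre_); .getD "" is a dummy there
  let st := (pvTaskGet task "scrape_type").getD ""
  let inputs : List String := []
  let inputs := if st = "by_location" then
      inputs ++ ((PySem.Str.split? (scrape_value.getD "") ",").getD []).map (fun v => "location_posts__" ++ v)
    else inputs
  let inputs := if st = "by_username" then
      inputs ++ ((PySem.Str.split? (scrape_value.getD "") ",").getD []).map (fun v => "user_followers__" ++ v)
    else inputs
  let inputs := if st = "by_hashtag" then
      inputs ++ ((PySem.Str.split? (scrape_value.getD "") ",").getD []).map (fun v => "hashtag__" ++ v)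
    else inputs
  let inputs := if st = "by_keyword" then
      inputs ++ ((PySem.Str.split? (scrape_value.getD "") ",").getD []).map (fun v => "keyword__" ++ v)
    else inputs
  [("service", some "instagram"),
   ("name", pvTaskGet task "name"),
   ("max_threads", pvTaskGet task "max_threads"),
   ("max_requests_per_day", pvTaskGet task "max_requests_per_day"),
   ("input", some (PySem.Str.join "," inputs))]

-- ===== PORT B =====
def pvPrefixes : PySem.Dict String String :=
  PySem.Dict.ofList [("by_location", "location_posts__"), ("by_username", "user_followers__"),
                     ("by_hashtag", "hashtag__"), ("by_keyword", "keyword__")]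

def handle_scrapetask_form_from_frontend_alt (task : List (String × String)) : List (String × Option String) :=
  let pfx := pvPrefixes.get? ((pvTaskGet task "scrape_type").getD "")
  let joined : String :=
    match pfx with
    | none => ""
    | some p => p ++ PySem.Str.replace ((pvTaskGet task "scrape_value").getD "") "," ("," ++ p)
  [("service", some "instagram"),
   ("name", pvTaskGet task "name"),
   ("max_threads", pvTaskGet task "max_threads"),
   ("max_requests_per_day", pvTaskGet task "max_requests_per_day"),
   ("input", some joined)]

-- ===== PRECONDITION & SPEC =====
-- Pre_ excludes exactly the inputs where A raises: no 'scrape_type' key (KeyError), or a matching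
-- scrape_type with no 'scrape_value' key (AttributeError on None.split).
def Pre_handle_scrapetask_form_from_frontend (task : List (String × String)) : Prop :=
  ((task.find? (fun p => p.1 == "scrape_type")).map (·.2)).isSome = true ∧
  ((((task.find? (fun p => p.1 == "scrape_type")).map (·.2)).getD ""
      ∈ ["by_location", "by_username", "by_hashtag", "by_keyword"]) →
    (task.find? (fun p => p.1 == "scrape_value")).isSome = true)
instance (task : List (String × String)) : Decidable (Pre_handle_scrapetask_form_from_frontend task) := by
  unfold Pre_handle_scrapetask_form_from_frontend; infer_instance

def pvWitness_handle_scrapetask_form_from_frontend : (List (String × String)) :=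
  [("scrape_type", "by_hashtag"), ("scrape_value", "a,b"), ("name", "n")]

def Spec_handle_scrapetask_form_from_frontend (task : List (String × String)) (out : List (String × Option String)) : Prop := out = handle_scrapetask_form_from_frontend_alt task
instance (task : List (String × String)) (out : List (String × Option String)) : Decidable (Spec_handle_scrapetask_form_from_frontend task out) := by unfold Spec_handle_scrapetask_form_from_frontend; infer_instance

-- ===== CLAIM (what is proved, stated in full; the proofs are below) =====
def Claim_equal_handle_scrapetask_form_from_frontend : Prop := ∀ (task : List (String × String)), Dom_handle_scrapetask_form_from_frontend task → Pre_handle_scrapetask_form_from_frontend task → Spec_handle_scrapetask_form_from_frontend task (handle_scrapetask_form_from_frontend task)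

-- ===== LEMMAS AND PROOFS =====

-- the accumulator of splitOn.go is a reversed prefix of the output
lemma splitOn_go_acc (sep : List Char) :
    ∀ (fuel : Nat) (l cur : List Char) (acc : List (List Char)),
      PySem.Chars.splitOn.go sep fuel l cur acc
        = acc.reverse ++ PySem.Chars.splitOn.go sep fuel l cur [] := by
  intro fuel
  induction fuel with
  | zero => intro l cur acc; simp [PySem.Chars.splitOn.go]
  | succ f ih =>
    intro l cur acc
    cases l with
    | nil => simp [PySem.Chars.splitOn.go]
    | cons c t =>
      simp only [PySem.Chars.splitOn.go]
      split
      · rw [ih _ [] (cur.reverse :: acc), ih _ [] [cur.reverse]]; simp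
      · exact ih t (c :: cur) acc

-- the accumulator of replace.go is the reversed output so far
lemma replace_go_acc (old new : List Char) :
    ∀ (fuel : Nat) (l acc : List Char),
      PySem.Chars.replace.go old new fuel l acc
        = acc.reverse ++ PySem.Chars.replace.go old new fuel l [] := by
  intro fuel
  induction fuel with
  | zero => intro l acc; simp [PySem.Chars.replace.go]
  | succ f ih =>
    intro l acc
    cases l with
    | nil => simp [PySem.Chars.replace.go]
    | cons c t =>
      simp only [PySem.Chars.replace.go]
      split
      · rw [ih _ (new.reverse ++ acc), ih _ (new.reverse ++ [])]; simp
      · rw [ih t (c :: acc), ih t [c]]; simp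
-- splitOn.go never returns the empty list
lemma splitOn_go_ne_nil (sep : List Char) :
    ∀ (fuel : Nat) (l cur : List Char) (acc : List (List Char)),
      PySem.Chars.splitOn.go sep fuel l cur acc ≠ [] := by
  intro fuel
  induction fuel with
  | zero => intro l cur acc; simp [PySem.Chars.splitOn.go]
  | succ f ih =>
    intro l cur acc
    cases l with
    | nil => simp [PySem.Chars.splitOn.go]
    | cons c t =>
      simp only [PySem.Chars.splitOn.go]
      split
      · exact ih _ [] _
      · exact ih _ _ _

lemma join_cons_of_ne_nil (sep a : List Char) (xs : List (List Char)) (h : xs ≠ []) :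
    PySem.Chars.join sep (a :: xs) = a ++ sep ++ PySem.Chars.join sep xs := by
  cases xs with
  | nil => exact absurd rfl h
  | cons b t => exact PySem.Chars.join_cons_cons sep a b t

-- core invariant: joining the prefixed pieces of splitOn.go equals the rewrite done by replace.go
lemma join_map_go_eq_replace_go (p : List Char) :
    ∀ (fuel : Nat) (fuel' : Nat) (l cur : List Char), l.length ≤ fuel → l.length ≤ fuel' →
      PySem.Chars.join [','] ((PySem.Chars.splitOn.go [','] fuel l cur []).map (p ++ ·))
        = p ++ cur.reverse ++ PySem.Chars.replace.go [','] (',' :: p) fuel' l [] := by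
  intro fuel
  induction fuel with
  | zero =>
    intro fuel' l cur h h'
    have hl : l = [] := List.eq_nil_of_length_eq_zero (Nat.le_zero.mp h)
    subst hl
    cases fuel' <;>
      simp [PySem.Chars.splitOn.go, PySem.Chars.replace.go, PySem.Chars.join,
        List.intercalate]
  | succ f ih =>
    intro fuel' l cur h h'
    cases l with
    | nil =>
      cases fuel' <;>
        simp [PySem.Chars.splitOn.go, PySem.Chars.replace.go, PySem.Chars.join,
          List.intercalate]
    | cons c t =>
      cases fuel' with
      | zero => simp at h'
      | succ f' =>
        simp only [PySem.Chars.splitOn.go, PySem.Chars.replace.go]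
        by_cases hc : [','].isPrefixOf (c :: t) = true
        · rw [if_pos hc, if_pos hc]
          have hdrop : List.drop [','].length (c :: t) = t := by simp
          rw [hdrop]
          rw [splitOn_go_acc [','] f t [] [cur.reverse]]
          rw [replace_go_acc [','] (',' :: p) f' t ((',' :: p).reverse ++ [])]
          simp only [List.reverse_cons, List.reverse_nil, List.nil_append, List.map_cons,
            List.append_nil, List.reverse_append, List.reverse_reverse,
            List.singleton_append]
          rw [join_cons_of_ne_nil _ _ _ (by
            intro hnil
            exact splitOn_go_ne_nil [','] f t [] [] (List.map_eq_nil_iff.mp hnil))]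
          rw [ih f' t [] (by simpa using Nat.le_of_succ_le_succ h)
                (by simpa using Nat.le_of_succ_le_succ h')]
          simp
        · rw [if_neg hc, if_neg hc]
          rw [replace_go_acc [','] (',' :: p) f' t [c]]
          rw [ih f' t (c :: cur) (by simpa using Nat.le_of_succ_le_succ h)
                (by simpa using Nat.le_of_succ_le_succ h')]
          simp

lemma join_map_splitOn_eq_replace (p s : List Char) :
    PySem.Chars.join [','] ((PySem.Chars.splitOn s [',']).map (p ++ ·))
      = p ++ PySem.Chars.replace s [','] (',' :: p) := by
  unfold PySem.Chars.splitOn PySem.Chars.replace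
  rw [if_neg (by simp)]
  have := join_map_go_eq_replace_go p (s.length + 1) s.length s [] (by omega) (le_refl _)
  simpa using this

-- String-level version, in the exact shape the ports use
lemma str_join_map_split_eq_replace (p s : String) :
    PySem.Str.join "," (((PySem.Str.split? s ",").getD []).map (fun v => p ++ v))
      = p ++ PySem.Str.replace s "," ("," ++ p) := by
  unfold PySem.Str.join PySem.Str.split? PySem.Str.replace
  rw [PySem.Chars.split?]
  rw [if_neg (by simp)]
  simp only [Option.map_some, Option.getD_some, List.map_map]
  have hmap : (List.map (String.toList ∘ (fun v => p ++ v) ∘ String.ofList)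
      (PySem.Chars.splitOn s.toList ",".toList))
      = (PySem.Chars.splitOn s.toList ",".toList).map (p.toList ++ ·) := by
    apply List.map_congr_left; intro x _; simp
  rw [hmap]
  have hsep : ",".toList = [','] := rfl
  rw [hsep, join_map_splitOn_eq_replace p.toList s.toList]
  apply String.toList_injective
  simp

-- ===== VERDICT (by name: the statement is the Claim_ definition above) =====
theorem handle_scrapetask_form_from_frontend_spec : Claim_equal_handle_scrapetask_form_from_frontend := by
  intro task _ _
  unfold Spec_handle_scrapetask_form_from_frontend handle_scrapetask_form_from_frontend
    handle_scrapetask_form_from_frontend_alt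
  generalize (pvTaskGet task "scrape_type").getD "" = st
  by_cases h1 : st = "by_location" <;> by_cases h2 : st = "by_username" <;>
    by_cases h3 : st = "by_hashtag" <;> by_cases h4 : st = "by_keyword" <;>
    simp_all [pvPrefixes, PySem.Dict.ofList, PySem.Dict.empty, PySem.Dict.update,
      PySem.Dict.get?, PySem.Dict.insert, PySem.Dict.contains,
      List.find?, Ne.symm, str_join_map_split_eq_replace] <;>
    rw [beq_eq_false_iff_ne.mpr (Ne.symm ‹¬st = "by_username"›),
        beq_eq_false_iff_ne.mpr (Ne.symm ‹¬st = "by_hashtag"›),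
        beq_eq_false_iff_ne.mpr (Ne.symm ‹¬st = "by_keyword"›)] <;> rfl
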